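-- pv_equiv track=rewrite | github.com/FDlucifer/offensive-go-python-rust | leetcode-python-go/1419. 数青蛙/main3.py | minNumberOfFrogs
-- ===== SOURCE A (Python) =====
-- def minNumberOfFrogs(croakOfFrogs: str) -> int:
--     c,r,o,a,k = 0,0,0,0,0
--     ret = 0
--     for i in croakOfFrogs:
--         if i == 'c':
--             c += 1
--             ret = max(c-k,ret)
--         elif c > r and i == 'r':
--             r += 1
--         elif r > o and i == 'o':
--             o += 1
--         elif o > a and i == 'a':
--             a += 1
--         elif a > k and i == 'k':
--             k += 1
--         else:return -1
--     return ret if c==r and c==o and c==a and c==k else -1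
-- ===== SOURCE B (Python) =====
-- def minNumberOfFrogs(croakOfFrogs: str) -> int:
--     word = "croak"
--     # staged passes instead of a single state machine
--     if any(ch not in word for ch in croakOfFrogs):
--         return -1
--     # for each adjacent letter pair: every prefix has >= as many of the
--     # earlier letter, and totals are equal overall
--     for x, y in zip(word, word[1:]):
--         bal = 0
--         for ch in croakOfFrogs:
--             if ch == x:
--                 bal += 1
--             elif ch == y:
--                 bal -= 1
--                 if bal < 0:
--                     return -1
--         if bal != 0:
--             return -1
--     # peak number of simultaneously active frogs = max prefix value of (#c - #k)
--     cur = best = 0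
--     for ch in croakOfFrogs:
--         if ch == 'c':
--             cur += 1
--             best = max(best, cur)
--         elif ch == 'k':
--             cur -= 1
--     return best
-- ===== Notes on version B (the rewrite author's own statement) =====
-- stated objective: alternative
-- what changed: B replaces A's single-pass five-counter state machine by staged independent passes: a membership check, one prefix-balance validity pass per adjacent letter pair of the target word (balance must never go negative and end at zero), and a separate final pass computing the peak of the running open-minus-closed prefix balance.
import Mathlib
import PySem

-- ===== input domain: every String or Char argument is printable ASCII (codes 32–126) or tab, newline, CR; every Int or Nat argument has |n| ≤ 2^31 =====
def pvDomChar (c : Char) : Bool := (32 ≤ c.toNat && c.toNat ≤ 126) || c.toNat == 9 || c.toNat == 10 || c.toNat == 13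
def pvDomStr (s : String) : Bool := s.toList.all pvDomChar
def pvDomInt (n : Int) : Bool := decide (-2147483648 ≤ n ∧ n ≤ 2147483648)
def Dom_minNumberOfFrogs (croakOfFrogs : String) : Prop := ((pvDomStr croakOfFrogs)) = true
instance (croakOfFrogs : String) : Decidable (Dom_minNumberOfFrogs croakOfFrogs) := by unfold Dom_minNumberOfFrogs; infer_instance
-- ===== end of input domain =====

-- B replaces A's single five-counter state machine by staged passes: a membership
-- check, one prefix-balance pass per adjacent letter pair of "croak", and a final
-- peak pass; objective: alternative decomposition, same cost.

-- ===== PORT A =====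
-- state: (c, r, o, a, k, ret); none = the loop executed `return -1`
def pvStepA (s : Option (Int × Int × Int × Int × Int × Int)) (ch : Char) :
    Option (Int × Int × Int × Int × Int × Int) :=
  match s with
  | none => none
  | some (c, r, o, a, k, ret) =>
    if ch = 'c' then some (c + 1, r, o, a, k, max (c + 1 - k) ret)
    else if c > r ∧ ch = 'r' then some (c, r + 1, o, a, k, ret)
    else if r > o ∧ ch = 'o' then some (c, r, o + 1, a, k, ret)
    else if o > a ∧ ch = 'a' then some (c, r, o, a + 1, k, ret)
    else if a > k ∧ ch = 'k' then some (c, r, o, a, k + 1, ret)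
    else none

def minNumberOfFrogs (croakOfFrogs : String) : Int :=
  match croakOfFrogs.toList.foldl pvStepA (some (0, 0, 0, 0, 0, 0)) with
  | none => -1
  | some (c, r, o, a, k, ret) => if c = r ∧ c = o ∧ c = a ∧ c = k then ret else -1

-- ===== PORT B =====
-- the inner per-pair loop: running balance; none = the early `return -1` (bal < 0)
def pvPairStep (x y : Char) (s : Option Int) (ch : Char) : Option Int :=
  match s with
  | none => none
  | some b =>
    if ch = x then some (b + 1)
    else if ch = y then (if b - 1 < 0 then none else some (b - 1))
    else some b

-- one pair check: loop succeeded and ended with balance 0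
def pvPairCheck (x y : Char) (l : List Char) : Bool :=
  match l.foldl (pvPairStep x y) (some 0) with
  | none => false
  | some b => b = 0

-- zip(word, word[1:])
def pvPairs : List (Char × Char) := [('c', 'r'), ('r', 'o'), ('o', 'a'), ('a', 'k')]

-- final pass: (cur, best)
def pvBestStep (s : Int × Int) (ch : Char) : Int × Int :=
  if ch = 'c' then (s.1 + 1, max s.2 (s.1 + 1))
  else if ch = 'k' then (s.1 - 1, s.2)
  else s

def minNumberOfFrogs_alt (croakOfFrogs : String) : Int :=
  let l := croakOfFrogs.toList
  if l.any (fun ch => decide (ch ∉ (['c', 'r', 'o', 'a', 'k'] : List Char))) then -1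
  else if pvPairs.all (fun p => pvPairCheck p.1 p.2 l) then
    (l.foldl pvBestStep (0, 0)).2
  else -1

-- ===== PRECONDITION & SPEC =====
def Spec_minNumberOfFrogs (croakOfFrogs : String) (out : Int) : Prop := out = minNumberOfFrogs_alt croakOfFrogs
instance (croakOfFrogs : String) (out : Int) : Decidable (Spec_minNumberOfFrogs croakOfFrogs out) := by unfold Spec_minNumberOfFrogs; infer_instance

-- ===== CLAIM (what is proved, stated in full; the proofs are below) =====
def Claim_equal_minNumberOfFrogs : Prop := ∀ (croakOfFrogs : String), Dom_minNumberOfFrogs croakOfFrogs → Spec_minNumberOfFrogs croakOfFrogs (minNumberOfFrogs croakOfFrogs)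

-- ===== LEMMAS AND PROOFS =====

lemma foldA_none (l : List Char) : l.foldl pvStepA none = none := by
  induction l with
  | nil => rfl
  | cons ch t ih => simpa [pvStepA] using ih

-- A fails whenever the string contains a character outside "croak"
lemma foldA_unknown (l : List Char) (h : ∃ ch ∈ l, ch ∉ (['c','r','o','a','k'] : List Char)) :
    ∀ s, l.foldl pvStepA s = none := by
  induction l with
  | nil => simp at h
  | cons ch t ih =>
    intro s
    rcases h with ⟨u, hu, hnu⟩
    rcases List.mem_cons.mp hu with h1 | h2
    · subst h1
      cases s with
      | none => simp [List.foldl, pvStepA, foldA_none]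
      | some st =>
        obtain ⟨c, r, o, a, k, ret⟩ := st
        simp only [List.mem_cons, List.not_mem_nil, or_false, not_or] at hnu
        simp only [List.foldl]
        have : pvStepA (some (c, r, o, a, k, ret)) u = none := by
          simp [pvStepA, hnu.1, hnu.2.1, hnu.2.2.1, hnu.2.2.2.1, hnu.2.2.2.2]
        rw [this, foldA_none]
    · exact ih ⟨u, h2, hnu⟩ _

-- the joint invariant between A's state and B's four pair balances and peak state
def pvRelS (sA : Option (Int × Int × Int × Int × Int × Int))
    (p1 p2 p3 p4 : Option Int) (cb : Int × Int) : Prop :=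
  match sA with
  | some (c, r, o, a, k, ret) =>
      p1 = some (c - r) ∧ p2 = some (r - o) ∧ p3 = some (o - a) ∧ p4 = some (a - k) ∧
      r ≤ c ∧ o ≤ r ∧ a ≤ o ∧ k ≤ a ∧ cb = (c - k, ret)
  | none => p1 = none ∨ p2 = none ∨ p3 = none ∨ p4 = none

lemma pvRelS_step (ch : Char) (hch : ch ∈ (['c','r','o','a','k'] : List Char))
    (sA : Option (Int × Int × Int × Int × Int × Int)) (p1 p2 p3 p4 : Option Int)
    (cb : Int × Int) (h : pvRelS sA p1 p2 p3 p4 cb) :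
    pvRelS (pvStepA sA ch) (pvPairStep 'c' 'r' p1 ch) (pvPairStep 'r' 'o' p2 ch)
      (pvPairStep 'o' 'a' p3 ch) (pvPairStep 'a' 'k' p4 ch) (pvBestStep cb ch) := by
  cases sA with
  | none =>
    rcases h with h | h | h | h <;> subst h
    · exact Or.inl rfl
    · exact Or.inr (Or.inl rfl)
    · exact Or.inr (Or.inr (Or.inl rfl))
    · exact Or.inr (Or.inr (Or.inr rfl))
  | some st =>
    obtain ⟨c, r, o, a, k, ret⟩ := st
    obtain ⟨h1, h2, h3, h4, hcr, hro, hoa, hak, hcb⟩ := h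
    subst h1 h2 h3 h4 hcb
    simp only [List.mem_cons, List.not_mem_nil, or_false] at hch
    rcases hch with h | h | h | h | h <;> subst h
    · -- 'c'
      have e0 : pvStepA (some (c, r, o, a, k, ret)) 'c'
          = some (c + 1, r, o, a, k, max (c + 1 - k) ret) := by simp [pvStepA]
      rw [e0]
      have ecb : pvBestStep (c - k, ret) 'c' = (c + 1 - k, max (c + 1 - k) ret) := by
        have hx : c - k + 1 = c + 1 - k := by ring
        simp [pvBestStep, hx, max_comm]
      exact ⟨by simp [pvPairStep]; ring_nf, by simp [pvPairStep], by simp [pvPairStep],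
        by simp [pvPairStep], by omega, hro, hoa, hak, ecb⟩
    · -- 'r'
      by_cases hg : c > r
      · have e0 : pvStepA (some (c, r, o, a, k, ret)) 'r'
            = some (c, r + 1, o, a, k, ret) := by simp [pvStepA, hg]
        rw [e0]
        exact ⟨by simp [pvPairStep]; omega, by simp [pvPairStep]; ring_nf,
          by simp [pvPairStep], by simp [pvPairStep], by omega, by omega, hoa, hak,
          by simp [pvBestStep]⟩
      · have e0 : pvStepA (some (c, r, o, a, k, ret)) 'r' = none := by
          simp [pvStepA, hg]
        rw [e0]
        exact Or.inl (by simp [pvPairStep]; omega)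
    · -- 'o'
      by_cases hg : r > o
      · have e0 : pvStepA (some (c, r, o, a, k, ret)) 'o'
            = some (c, r, o + 1, a, k, ret) := by simp [pvStepA, hg]
        rw [e0]
        exact ⟨by simp [pvPairStep], by simp [pvPairStep]; omega,
          by simp [pvPairStep]; ring_nf, by simp [pvPairStep], by omega, by omega,
          by omega, hak, by simp [pvBestStep]⟩
      · have e0 : pvStepA (some (c, r, o, a, k, ret)) 'o' = none := by
          simp [pvStepA, hg]
        rw [e0]
        exact Or.inr (Or.inl (by simp [pvPairStep]; omega))
    · -- 'a'
      by_cases hg : o > a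
      · have e0 : pvStepA (some (c, r, o, a, k, ret)) 'a'
            = some (c, r, o, a + 1, k, ret) := by simp [pvStepA, hg]
        rw [e0]
        exact ⟨by simp [pvPairStep], by simp [pvPairStep],
          by simp [pvPairStep]; omega, by simp [pvPairStep]; ring_nf, by omega,
          by omega, by omega, by omega, by simp [pvBestStep]⟩
      · have e0 : pvStepA (some (c, r, o, a, k, ret)) 'a' = none := by
          simp [pvStepA, hg]
        rw [e0]
        exact Or.inr (Or.inr (Or.inl (by simp [pvPairStep]; omega)))
    · -- 'k'
      by_cases hg : a > k
      · have e0 : pvStepA (some (c, r, o, a, k, ret)) 'k'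
            = some (c, r, o, a, k + 1, ret) := by simp [pvStepA, hg]
        rw [e0]
        refine ⟨by simp [pvPairStep], by simp [pvPairStep], by simp [pvPairStep],
          by simp [pvPairStep]; omega, by omega, by omega, by omega, by omega, ?_⟩
        have hx : c - k - 1 = c - (k + 1) := by ring
        simp [pvBestStep, hx]
      · have e0 : pvStepA (some (c, r, o, a, k, ret)) 'k' = none := by
          simp [pvStepA, hg]
        rw [e0]
        exact Or.inr (Or.inr (Or.inr (by simp [pvPairStep]; omega)))

lemma pvRelS_fold (l : List Char) (hl : ∀ ch ∈ l, ch ∈ (['c','r','o','a','k'] : List Char)) :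
    ∀ sA p1 p2 p3 p4 cb, pvRelS sA p1 p2 p3 p4 cb →
    pvRelS (l.foldl pvStepA sA) (l.foldl (pvPairStep 'c' 'r') p1)
      (l.foldl (pvPairStep 'r' 'o') p2) (l.foldl (pvPairStep 'o' 'a') p3)
      (l.foldl (pvPairStep 'a' 'k') p4) (l.foldl pvBestStep cb) := by
  induction l with
  | nil => intro _ _ _ _ _ _ h; exact h
  | cons ch t ih =>
    intro sA p1 p2 p3 p4 cb h
    exact ih (fun c hc => hl c (List.mem_cons_of_mem _ hc)) _ _ _ _ _ _
      (pvRelS_step ch (hl ch (List.mem_cons_self)) _ _ _ _ _ _ h)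

-- ===== VERDICT (by name: the statement is the Claim_ definition above) =====
theorem minNumberOfFrogs_spec : Claim_equal_minNumberOfFrogs := by
  intro s _
  unfold Spec_minNumberOfFrogs minNumberOfFrogs minNumberOfFrogs_alt
  by_cases hun : ∃ ch ∈ s.toList, ch ∉ (['c','r','o','a','k'] : List Char)
  · have hany : s.toList.any (fun ch => decide (ch ∉ (['c','r','o','a','k'] : List Char))) = true := by
      simp only [List.any_eq_true, decide_eq_true_eq]; exact hun
    rw [foldA_unknown s.toList hun]
    simp only [hany, if_true]
  · replace hun : ∀ ch ∈ s.toList, ch ∈ (['c','r','o','a','k'] : List Char) := by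
      intro ch hc; by_contra hn; exact hun ⟨ch, hc, hn⟩
    have hany : s.toList.any (fun ch => decide (ch ∉ (['c','r','o','a','k'] : List Char))) = false := by
      simp only [List.any_eq_false, decide_eq_true_eq, not_not]; exact hun
    simp only [hany, Bool.false_eq_true, if_false]
    have h := pvRelS_fold s.toList hun (some (0,0,0,0,0,0)) (some 0) (some 0) (some 0) (some 0)
      (0, 0) (by simp [pvRelS])
    cases hA : s.toList.foldl pvStepA (some (0,0,0,0,0,0)) with
    | none =>
      rw [hA] at h
      have hfalse : pvPairs.all (fun p => pvPairCheck p.1 p.2 s.toList) = false := by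
        simp only [pvPairs, List.all_cons, List.all_nil, Bool.and_true, Bool.and_eq_false_iff]
        rcases h with h | h | h | h
        · left; simp [pvPairCheck, h]
        · right; left; simp [pvPairCheck, h]
        · right; right; left; simp [pvPairCheck, h]
        · right; right; right; simp [pvPairCheck, h]
      simp [hfalse]
    | some st =>
      obtain ⟨c, r, o, a, k, ret⟩ := st
      rw [hA] at h
      obtain ⟨h1, h2, h3, h4, hcr, hro, hoa, hak, hcb⟩ := h
      have hb2 : (s.toList.foldl pvBestStep (0, 0)).2 = ret := by rw [hcb]
      have hall : pvPairs.all (fun p => pvPairCheck p.1 p.2 s.toList) =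
          (decide (c - r = 0) && decide (r - o = 0) && decide (o - a = 0) && decide (a - k = 0)) := by
        simp [pvPairs, pvPairCheck, h1, h2, h3, h4, Bool.and_assoc]
      simp only [hall, hb2, Bool.and_eq_true, decide_eq_true_eq]
      split_ifs <;> omega
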